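-- pv_equiv track=rewrite | github.com/RSSaltea/PoF-Wildy-Game | wildygame/wilderness.py | _format_items_short
-- ===== SOURCE A (Python) =====
-- from typing import Dict, Any, Optional, Tuple, List
--
-- def _format_items_short(items: Dict[str, int], max_lines: int = 12) -> str:
--     if not items:
--         return "(none)"
--     pairs = [(k, int(v)) for k, v in items.items() if int(v) > 0]
--     pairs.sort(key=lambda x: (x[0].lower(), x[0]))
--     lines = [f"- {k} x{v}" for k, v in pairs]
--     if len(lines) > max_lines:
--         rest = len(lines) - max_lines
--         lines = lines[:max_lines] + [f"... (+{rest} more)"]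
--     return "\n".join(lines) if lines else "(none)"
-- ===== SOURCE B (Python) =====
-- def _lt(a, b):
--     return (a[0].lower(), a[0]) < (b[0].lower(), b[0])
--
--
-- def _format_items_short(items, max_lines: int = 12) -> str:
--     if not items:
--         return "(none)"
--     ordered = []  # kept sorted by (name.lower(), name); built by one insertion pass
--     for k, v in items.items():
--         v = int(v)
--         if v <= 0:
--             continue
--         kv = (k, v)
--         pos = len(ordered)
--         for j, q in enumerate(ordered):
--             if not _lt(q, kv):
--                 pos = j
--                 break
--         ordered.insert(pos, kv)
--     n = len(ordered)
--     if n > max_lines: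
--         lines = ["- %s x%d" % p for p in ordered[:max_lines]]
--         lines.append("... (+%d more)" % (n - max_lines))
--     else:
--         lines = ["- %s x%d" % p for p in ordered]
--     return "\n".join(lines) if lines else "(none)"
-- ===== Notes on version B (the rewrite author's own statement) =====
-- stated objective: alternative
-- what changed: B replaces A's build-filter-then-library-sort-then-slice pipeline by a single insertion pass that keeps a sorted list of the positive entries (linear-scan insertion point per item) and truncates before formatting, so no separate sort step or full-list formatting occurs.
import Mathlib
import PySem

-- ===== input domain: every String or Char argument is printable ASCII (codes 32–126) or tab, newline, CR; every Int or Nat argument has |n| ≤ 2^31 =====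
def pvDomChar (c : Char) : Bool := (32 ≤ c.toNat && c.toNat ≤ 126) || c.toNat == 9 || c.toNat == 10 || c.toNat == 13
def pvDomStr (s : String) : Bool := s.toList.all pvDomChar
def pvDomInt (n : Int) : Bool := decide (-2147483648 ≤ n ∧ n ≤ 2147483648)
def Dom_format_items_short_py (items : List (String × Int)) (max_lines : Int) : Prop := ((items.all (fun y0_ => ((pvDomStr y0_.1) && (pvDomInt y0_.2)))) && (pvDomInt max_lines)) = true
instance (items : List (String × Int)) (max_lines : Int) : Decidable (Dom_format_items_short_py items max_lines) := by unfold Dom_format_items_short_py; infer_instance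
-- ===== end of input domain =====

-- B replaces filter + library sort + slice by a single insertion pass keeping a sorted list
-- of positive entries and truncating before formatting (alternative structure, same values).


-- ===== PORT A =====
-- the dict parameter is modelled as its item list; Dict.ofList reconstructs dict(items)
-- (last value wins, first position kept), so `items.items()` is `(Dict.ofList items).items`.
-- `int(v)` on an int is the identity, ported as `(kv.1, kv.2)`.
def format_items_short_py (items : List (String × Int)) (max_lines : Int) : String :=
  let d := PySem.Dict.ofList items
  if d.items.isEmpty then "(none)"
  else
    let pairs := (d.items.filter (fun kv => decide (kv.2 > 0))).map (fun kv => (kv.1, kv.2))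
    let spairs := PySem.List.sorted2 pairs (fun x => PySem.Str.lower x.1) (fun x => x.1)
    let lines := spairs.map (fun kv => "- " ++ kv.1 ++ " x" ++ PySem.Int.toStr kv.2)
    let lines2 :=
      if (lines.length : Int) > max_lines then
        PySem.List.slice lines none (some max_lines) ++
          ["... (+" ++ PySem.Int.toStr ((lines.length : Int) - max_lines) ++ " more)"]
      else lines
    if lines2.isEmpty then "(none)" else PySem.Str.join "\n" lines2

-- ===== PORT B =====
-- helper `_lt(a, b)`: Python tuple comparison (a[0].lower(), a[0]) < (b[0].lower(), b[0])
def keyLtB (a b : String × Int) : Bool :=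
  decide (PySem.Str.lower a.1 < PySem.Str.lower b.1) ||
    (decide (PySem.Str.lower a.1 = PySem.Str.lower b.1) && decide (a.1 < b.1))

-- the inner for/break loop returning the first index j with `not _lt(q, kv)` (default len)
-- is List.findIdx; `ordered.insert(pos, kv)` is PySem.List.insert.
def format_items_short_py_alt (items : List (String × Int)) (max_lines : Int) : String :=
  let d := PySem.Dict.ofList items
  if d.items.isEmpty then "(none)"
  else
    let ordered := d.items.foldl
      (fun acc kv =>
        if kv.2 ≤ 0 then acc
        else PySem.List.insert acc ((acc.findIdx (fun q => !(keyLtB q kv)) : Nat) : Int) (kv.1, kv.2))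
      []
    let n : Int := ordered.length
    let lines :=
      if n > max_lines then
        (PySem.List.slice ordered none (some max_lines)).map
            (fun kv => "- " ++ kv.1 ++ " x" ++ PySem.Int.toStr kv.2) ++
          ["... (+" ++ PySem.Int.toStr (n - max_lines) ++ " more)"]
      else ordered.map (fun kv => "- " ++ kv.1 ++ " x" ++ PySem.Int.toStr kv.2)
    if lines.isEmpty then "(none)" else PySem.Str.join "\n" lines

-- ===== PRECONDITION & SPEC =====
def Spec_format_items_short_py (items : List (String × Int)) (max_lines : Int) (out : String) : Prop := out = format_items_short_py_alt items max_lines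
instance (items : List (String × Int)) (max_lines : Int) (out : String) : Decidable (Spec_format_items_short_py items max_lines out) := by unfold Spec_format_items_short_py; infer_instance

-- ===== CLAIM (what is proved, stated in full; the proofs are below) =====
def Claim_equal_format_items_short_py : Prop := ∀ (items : List (String × Int)) (max_lines : Int), Dom_format_items_short_py items max_lines → Spec_format_items_short_py items max_lines (format_items_short_py items max_lines)

-- ===== LEMMAS AND PROOFS =====

-- strict lexicographic order on (name.lower(), name), the sort key both versions use
def lexR (a b : String × Int) : Prop :=
  PySem.Str.lower a.1 < PySem.Str.lower b.1 ∨
    (PySem.Str.lower a.1 = PySem.Str.lower b.1 ∧ a.1 < b.1)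

lemma lexR_trans {a b c : String × Int} (h1 : lexR a b) (h2 : lexR b c) : lexR a c := by
  unfold lexR at *
  rcases h1 with h1 | ⟨h1e, h1s⟩ <;> rcases h2 with h2 | ⟨h2e, h2s⟩
  · exact Or.inl (lt_trans h1 h2)
  · exact Or.inl (h2e ▸ h1)
  · exact Or.inl (h1e ▸ h2)
  · exact Or.inr ⟨h1e.trans h2e, lt_trans h1s h2s⟩

lemma lexR_irrefl (a : String × Int) : ¬ lexR a a := by
  unfold lexR; rintro (h | ⟨_, h⟩) <;> exact lt_irrefl _ h

lemma lexR_asymm {a b : String × Int} (h : lexR a b) : ¬ lexR b a :=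
  fun h' => lexR_irrefl a (lexR_trans h h')

lemma lexR_total_ne {a b : String × Int} (h : a.1 ≠ b.1) : lexR a b ∨ lexR b a := by
  unfold lexR
  rcases lt_trichotomy (PySem.Str.lower a.1) (PySem.Str.lower b.1) with hl | hl | hl
  · exact Or.inl (Or.inl hl)
  · rcases lt_or_gt_of_ne h with hs | hs
    · exact Or.inl (Or.inr ⟨hl, hs⟩)
    · exact Or.inr (Or.inr ⟨hl.symm, hs⟩)
  · exact Or.inr (Or.inl hl)

lemma keyLtB_iff (a b : String × Int) : keyLtB a b = true ↔ lexR a b := by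
  simp [keyLtB, lexR]

-- A's sorted2 comparison function
def ltA (a b : String × Int) : Bool :=
  decide (PySem.Str.lower a.1 < PySem.Str.lower b.1) ||
    (!decide (PySem.Str.lower b.1 < PySem.Str.lower a.1) && decide (a.1 < b.1))

lemma sorted2_eq_foldl (xs : List (String × Int)) :
    PySem.List.sorted2 xs (fun x => PySem.Str.lower x.1) (fun x => x.1) =
      xs.foldl (fun acc x => PySem.List.insertBy ltA x acc) [] := rfl

lemma ltA_spec (x y : String × Int) (h : x.1 ≠ y.1) :
    (ltA x y = true → lexR x y) ∧ (ltA x y = false → lexR y x) := by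
  constructor
  · intro ht
    simp only [ltA, Bool.or_eq_true, Bool.and_eq_true, Bool.not_eq_true', decide_eq_true_iff,
      decide_eq_false_iff_not] at ht
    rcases ht with ht | ⟨hle, hs⟩
    · exact Or.inl ht
    · rcases lt_trichotomy (PySem.Str.lower x.1) (PySem.Str.lower y.1) with hl | hl | hl
      · exact Or.inl hl
      · exact Or.inr ⟨hl, hs⟩
      · exact absurd hl hle
  · intro hf
    simp only [ltA, Bool.or_eq_false_iff, Bool.and_eq_false_iff, Bool.not_eq_false',
      decide_eq_true_iff, decide_eq_false_iff_not] at hf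
    obtain ⟨h1, h2⟩ := hf
    rcases h2 with h2 | h2
    · exact Or.inl h2
    · rcases lt_trichotomy (PySem.Str.lower x.1) (PySem.Str.lower y.1) with hl | hl | hl
      · exact absurd hl h1
      · rcases lt_or_gt_of_ne h with hs | hs
        · exact absurd hs h2
        · exact Or.inr ⟨hl.symm, hs⟩
      · exact Or.inl hl

def beforeB (a b : String × Int) : Bool := !(keyLtB b a)

lemma beforeB_spec (x y : String × Int) (h : x.1 ≠ y.1) :
    (beforeB x y = true → lexR x y) ∧ (beforeB x y = false → lexR y x) := by
  constructor
  · intro ht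
    have hk : keyLtB y x = false := by simpa [beforeB] using ht
    have : ¬ lexR y x := fun hl => by simp [(keyLtB_iff y x).2 hl] at hk
    rcases lexR_total_ne h with h' | h'
    · exact h'
    · exact absurd h' this
  · intro hf
    have : keyLtB y x = true := by simpa [beforeB] using hf
    exact (keyLtB_iff y x).1 this

lemma insertBy_eq_take_drop {α : Type} (before : α → α → Bool) (x : α) (l : List α) :
    PySem.List.insertBy before x l =
      l.take (l.findIdx (fun y => before x y)) ++ x :: l.drop (l.findIdx (fun y => before x y)) := by
  induction l with
  | nil => simp [PySem.List.insertBy]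
  | cons y ys ih =>
    by_cases h : before x y
    · simp [PySem.List.insertBy, h, List.findIdx_cons]
    · simp [PySem.List.insertBy, h, List.findIdx_cons, ih]

lemma insert_findIdx_eq_insertBy {α : Type} (P : α → Bool) (x : α) (l : List α) :
    PySem.List.insert l ((l.findIdx P : Nat) : Int) x = PySem.List.insertBy (fun _ b => P b) x l := by
  rw [PySem.List.insert_natCast _ _ _ List.findIdx_le_length, insertBy_eq_take_drop]

lemma insertBy_congr {α : Type} (f g : α → α → Bool) (x : α) (l : List α)
    (h : ∀ y, f x y = g x y) : PySem.List.insertBy f x l = PySem.List.insertBy g x l := by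
  induction l with
  | nil => simp [PySem.List.insertBy]
  | cons y ys ih => simp [PySem.List.insertBy, h y, ih]

lemma insertBy_pairwise_lexR (before : (String × Int) → (String × Int) → Bool)
    (x : String × Int) (l : List (String × Int)) (hl : l.Pairwise lexR)
    (h : ∀ y ∈ l, (before x y = true → lexR x y) ∧ (before x y = false → lexR y x)) :
    (PySem.List.insertBy before x l).Pairwise lexR := by
  induction l with
  | nil => simp [PySem.List.insertBy]
  | cons y ys ih =>
    by_cases hb : before x y
    · simp only [PySem.List.insertBy, hb, if_true]
      refine List.Pairwise.cons ?_ hl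
      intro z hz
      rcases List.mem_cons.1 hz with heq | hz2
      · rw [heq]; exact (h y (by simp)).1 hb
      · exact lexR_trans ((h y (by simp)).1 hb) (List.rel_of_pairwise_cons hl hz2)
    · simp only [PySem.List.insertBy, hb]
      refine List.Pairwise.cons ?_ (ih hl.tail (fun z hz => h z (by simp [hz])))
      intro z hz
      rcases (PySem.List.mem_insertBy before x z ys).1 hz with heq | hz2
      · rw [heq]; exact (h y (by simp)).2 (by simpa using hb)
      · exact List.rel_of_pairwise_cons hl hz2

lemma foldl_insertBy_ok (before : (String × Int) → (String × Int) → Bool)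
    (h : ∀ x y : String × Int, x.1 ≠ y.1 →
      ((before x y = true → lexR x y) ∧ (before x y = false → lexR y x)))
    (L : List (String × Int)) :
    ∀ acc : List (String × Int), ((acc ++ L).map Prod.fst).Nodup → acc.Pairwise lexR →
      (L.foldl (fun a x => PySem.List.insertBy before x a) acc).Perm (acc ++ L) ∧
        (L.foldl (fun a x => PySem.List.insertBy before x a) acc).Pairwise lexR := by
  induction L with
  | nil => intro acc _ hacc; simp [hacc]
  | cons x L ih =>
    intro acc hn hacc
    have hn' : (acc.map Prod.fst ++ x.1 :: L.map Prod.fst).Nodup := by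
      simpa using hn
    have hne : ∀ y ∈ acc, x.1 ≠ y.1 := by
      intro y hy
      have hdisj := (List.nodup_append.1 hn').2.2
      intro hEq
      exact hdisj y.1 (List.mem_map_of_mem hy) x.1 (by simp) hEq.symm
    have hperm : (PySem.List.insertBy before x acc).Perm (x :: acc) :=
      PySem.List.insertBy_perm before x acc
    have hpw : (PySem.List.insertBy before x acc).Pairwise lexR :=
      insertBy_pairwise_lexR before x acc hacc (fun y hy => h x y (hne y hy))
    have hpermL : ((PySem.List.insertBy before x acc) ++ L).Perm (acc ++ x :: L) :=
      (hperm.append_right L).trans (List.perm_middle.symm)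
    have hnodup' : (((PySem.List.insertBy before x acc) ++ L).map Prod.fst).Nodup :=
      (hpermL.map Prod.fst).symm.nodup hn
    have := ih (PySem.List.insertBy before x acc) hnodup' hpw
    refine ⟨this.1.trans hpermL, this.2⟩

lemma eq_of_perm_pairwise {l₁ l₂ : List (String × Int)} (hp : l₁.Perm l₂)
    (h1 : l₁.Pairwise lexR) (h2 : l₂.Pairwise lexR) : l₁ = l₂ :=
  List.eq_of_perm_of_sorted (fun _ _ _ _ hab hba => absurd hba (lexR_asymm hab)) h1 h2 hp

lemma slice_map {α β : Type} (f : α → β) (l : List α) (b : Int) :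
    PySem.List.slice (l.map f) none (some b) = (PySem.List.slice l none (some b)).map f := by
  simp [PySem.List.slice, List.map_take]

-- the central identity: A's filter + sort equals B's insertion pass (keys are distinct)
lemma sorted_eq_ordered (L : List (String × Int)) (hN : (L.map Prod.fst).Nodup) :
    PySem.List.sorted2 (L.filter (fun kv => decide (kv.2 > 0)))
        (fun x => PySem.Str.lower x.1) (fun x => x.1) =
      L.foldl
        (fun acc kv =>
          if kv.2 ≤ 0 then acc
          else PySem.List.insert acc ((acc.findIdx (fun q => !(keyLtB q kv)) : Nat) : Int) (kv.1, kv.2))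
        [] := by
  have hbody : (fun (acc : List (String × Int)) (kv : String × Int) =>
      if kv.2 ≤ 0 then acc
      else PySem.List.insert acc ((acc.findIdx (fun q => !(keyLtB q kv)) : Nat) : Int) (kv.1, kv.2)) =
      (fun acc kv =>
        if (fun kv : String × Int => decide (kv.2 > 0)) kv = true then
          PySem.List.insertBy beforeB kv acc
        else acc) := by
    funext acc kv
    by_cases hkv : kv.2 ≤ 0
    · have : ¬ ((0 : Int) < kv.2) := by omega
      simp [hkv, this]
    · have : (0 : Int) < kv.2 := by omega
      rw [if_neg hkv, if_pos (by simpa using this)]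
      rw [insert_findIdx_eq_insertBy]
      exact insertBy_congr _ beforeB _ acc (fun y => rfl)
  rw [hbody, ← List.foldl_filter]
  set F := L.filter (fun kv => decide (kv.2 > 0)) with hF
  have hsub : F.Sublist L := List.filter_sublist
  have hNF : (F.map Prod.fst).Nodup := hN.sublist (hsub.map Prod.fst)
  have hA := foldl_insertBy_ok ltA ltA_spec F ([] : List (String × Int))
    (by simpa using hNF) List.Pairwise.nil
  have hB := foldl_insertBy_ok beforeB beforeB_spec F ([] : List (String × Int))
    (by simpa using hNF) List.Pairwise.nil
  have hA1 := hA.1; rw [List.nil_append] at hA1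
  have hB1 := hB.1; rw [List.nil_append] at hB1
  rw [sorted2_eq_foldl]
  exact eq_of_perm_pairwise (hA1.trans hB1.symm) hA.2 hB.2

lemma ports_agree (items : List (String × Int)) (max_lines : Int) :
    format_items_short_py items max_lines = format_items_short_py_alt items max_lines := by
  unfold format_items_short_py format_items_short_py_alt
  by_cases hE : (PySem.Dict.ofList items).items.isEmpty
  · simp [hE]
  · have hkeys : ((PySem.Dict.ofList items).items.map Prod.fst).Nodup := by
      have := PySem.Dict.nodup_keys_ofList items
      simpa [PySem.Dict.keys] using this
    have heta : ((PySem.Dict.ofList items).items.filter (fun kv => decide (kv.2 > 0))).map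
        (fun kv => (kv.1, kv.2)) =
        (PySem.Dict.ofList items).items.filter (fun kv => decide (kv.2 > 0)) := by
      simp
    simp only [hE, heta, sorted_eq_ordered _ hkeys]
    set X := (PySem.Dict.ofList items).items.foldl
      (fun acc kv =>
        if kv.2 ≤ 0 then acc
        else PySem.List.insert acc ((acc.findIdx (fun q => !(keyLtB q kv)) : Nat) : Int) (kv.1, kv.2))
      [] with hX
    by_cases hc : ((X.map (fun kv => "- " ++ kv.1 ++ " x" ++ PySem.Int.toStr kv.2)).length : Int) > max_lines
    · have hc' : ((X.length : Int) > max_lines) := by simpa using hc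
      simp only [hc', if_true, slice_map, List.length_map]
    · have hc' : ¬ ((X.length : Int) > max_lines) := by simpa using hc
      simp only [hc, hc', if_false]

-- ===== VERDICT (by name: the statement is the Claim_ definition above) =====
theorem format_items_short_py_spec : Claim_equal_format_items_short_py := by
  intro items max_lines _
  unfold Spec_format_items_short_py
  exact ports_agree items max_lines
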